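-- pv_equiv track=rewrite | github.com/coyote-AI-competition/resource | client/yaduya/logic.py | calculate_sum_coyote
-- ===== SOURCE A (Python) =====
-- def calculate_sum_without_random(players_card_list):
--     """カードの合計値を計算する関数
--
--     Args:
--         players_card_list (list): プレーヤーのカードリスト
--         1. 100以上のカードは特別なカードとして扱う
--         2. 100 -> x2, 101 -> max0, 102 -> 0 ,103 -> ?
--         3. 100以上のカードは、0にする
--         4. 102は0を追加する
--         5. 101は最大値を0にする
--
--     Returns:
--         tuple: 合計値とシャッフルの有無
--     """
--
--     calculate_sum = 0
--     number_cards: list[int] = [card for card in players_card_list if card < 100]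
--     special_cards: list[int] = [card for card in players_card_list if card >= 100]
--     is_double = False
--     is_suffle = False
--     for cards in special_cards:
--         if cards == 102:
--             number_cards.append(0)
--         elif cards == 101:
--             if number_cards:  # 空でなければ
--                 max_card_index = number_cards.index(max(number_cards))
--                 number_cards[max_card_index] = 0
--                 is_suffle = True
--         elif cards == 100:
--             number_cards.append(0)
--             is_double = True
--     if is_double:
--         calculate_sum = sum(number_cards) * 2
--     else:
--         calculate_sum = sum(number_cards)
--     return calculate_sum,is_suffle
--
-- def calculate_sum_coyote(players_card_list:list[int],now_dock:list[int]):
--     caluclate_sum = 0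
--     special_cards:list[int] = [card for card in players_card_list if card >= 100]
--     if 103 in special_cards :
--         card_expect = []
--         # 103のカードを除外する
--         special_cards.remove(103)
--         for card in now_dock:
--             # cardをplayers_card_listに追加する
--             random_players_card_list = players_card_list + [card]
--             # その合計値を計算する
--             caluclate_sum,is_suffle = calculate_sum_without_random(random_players_card_list)
--             card_expect.append(caluclate_sum)
--         return card_expect
--
--     else:
--         caluclate_sum,is_suffle =  calculate_sum_without_random(players_card_list)
--         return [caluclate_sum]
-- ===== SOURCE B (Python) =====
-- def _simulate(numbers, specials):
--     """Play the special cards against the number cards, in hand order.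
--
--     A 101 zeroes the largest card still in play; with the number cards
--     sorted descending that card sits at a moving pointer, and the zero
--     cards in play (added by 100/102, or left behind by a 101) only need
--     to be counted.  Returns the final total, doubled if a 100 was played.
--     """
--     s = sorted(numbers, reverse=True)
--     i = zeros = 0
--     total = sum(s)
--     double = False
--     for c in specials:
--         if c == 100 or c == 102:
--             zeros += 1
--             double = double or c == 100
--         elif c == 101:
--             # the largest card in play is s[i] unless a zero card beats it
--             if i < len(s) and (s[i] > 0 or zeros == 0):
--                 total -= s[i]
--                 i += 1
--                 zeros += 1
--     return 2 * total if double else total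
--
--
-- def calculate_sum_coyote(players_card_list, now_dock):
--     numbers = [c for c in players_card_list if c < 100]
--     specials = [c for c in players_card_list if c >= 100]
--     if 103 not in specials:
--         return [_simulate(numbers, specials)]
--     return [_simulate(numbers + [card], specials) if card < 100
--             else _simulate(numbers, specials + [card])
--             for card in now_dock]
-- ===== Notes on version B (the rewrite author's own statement) =====
-- stated objective: alternative
-- what changed: Instead of mutating the number-card list and rescanning it with max()+index() for every 101 and rebuilding the whole hand per dock candidate, B sorts the number cards descending and plays the special cards with a moving pointer plus a zero-card counter, so each 101 is O(1); per candidate it only extends the numbers or the specials list.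
import Mathlib
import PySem

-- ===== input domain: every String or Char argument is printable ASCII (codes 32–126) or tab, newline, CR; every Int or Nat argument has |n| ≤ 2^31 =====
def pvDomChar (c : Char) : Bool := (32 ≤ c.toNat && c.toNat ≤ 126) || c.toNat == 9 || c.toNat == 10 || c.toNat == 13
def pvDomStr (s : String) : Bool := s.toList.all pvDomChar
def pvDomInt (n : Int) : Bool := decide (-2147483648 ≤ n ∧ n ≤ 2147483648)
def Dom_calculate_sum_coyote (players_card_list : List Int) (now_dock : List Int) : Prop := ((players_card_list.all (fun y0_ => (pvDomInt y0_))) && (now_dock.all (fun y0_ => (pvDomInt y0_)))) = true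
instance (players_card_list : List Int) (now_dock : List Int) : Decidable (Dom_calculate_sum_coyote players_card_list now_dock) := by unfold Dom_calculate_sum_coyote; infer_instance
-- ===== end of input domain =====

-- B plays the special cards against the number cards sorted descending, with a moving
-- pointer and a zero-card counter, instead of A's list mutation with max()+index()
-- rescans and per-candidate hand rebuilding; same return value.

-- ===== PORT A =====

-- one iteration of A's 'for cards in special_cards' loop; state = (number_cards, is_double, is_suffle)
def pvStepA (s : List Int × Bool × Bool) (cards : Int) : List Int × Bool × Bool :=
  if cards = 102 then (s.1 ++ [0], s.2.1, s.2.2)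
  else if cards = 101 then
    if s.1 ≠ [] then
      match PySem.List.max? s.1 (fun x => x) with
      | none => s
      | some m =>
        match PySem.List.index? s.1 m with
        | none => s
        | some i => (s.1.set i 0, s.2.1, true)
    else s
  else if cards = 100 then (s.1 ++ [0], true, s.2.2)
  else s

def calculate_sum_without_random (players_card_list : List Int) : Int × Bool :=
  let number_cards := players_card_list.filter (fun card => decide (card < 100))
  let special_cards := players_card_list.filter (fun card => decide (card ≥ 100))
  let st := special_cards.foldl pvStepA (number_cards, false, false)
  (if st.2.1 then st.1.sum * 2 else st.1.sum, st.2.2)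

def calculate_sum_coyote (players_card_list : List Int) (now_dock : List Int) : List Int :=
  let special_cards := players_card_list.filter (fun card => decide (card ≥ 100))
  if special_cards.contains 103 then
    now_dock.foldl (fun card_expect card =>
      card_expect ++ [(calculate_sum_without_random (players_card_list ++ [card])).1]) []
  else [(calculate_sum_without_random players_card_list).1]

-- ===== PORT B =====

-- Source B _simulate's loop; state = (i, zeros, total, double); s[i] is guarded by i < len(s),
-- so getD is exact there
def pvSimStep (s : List Int) (st : Nat × Nat × Int × Bool) (c : Int) : Nat × Nat × Int × Bool :=
  if c = 100 ∨ c = 102 then (st.1, st.2.1 + 1, st.2.2.1, st.2.2.2 || decide (c = 100))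
  else if c = 101 then
    if st.1 < s.length ∧ (0 < s.getD st.1 0 ∨ st.2.1 = 0) then
      (st.1 + 1, st.2.1 + 1, st.2.2.1 - s.getD st.1 0, st.2.2.2)
    else st
  else st

def pvSimulate (numbers specials : List Int) : Int :=
  let s := PySem.List.sorted numbers (fun x => x) true
  let st := specials.foldl (pvSimStep s) (0, 0, s.sum, false)
  if st.2.2.2 then 2 * st.2.2.1 else st.2.2.1

def calculate_sum_coyote_alt (players_card_list : List Int) (now_dock : List Int) : List Int :=
  let numbers := players_card_list.filter (fun c => decide (c < 100))
  let specials := players_card_list.filter (fun c => decide (c ≥ 100))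
  if ¬ specials.contains 103 then [pvSimulate numbers specials]
  else now_dock.map (fun card =>
    if card < 100 then pvSimulate (numbers ++ [card]) specials
    else pvSimulate numbers (specials ++ [card]))

-- ===== PRECONDITION & SPEC =====
def Spec_calculate_sum_coyote (players_card_list : List Int) (now_dock : List Int) (out : List Int) : Prop := out = calculate_sum_coyote_alt players_card_list now_dock
instance (players_card_list : List Int) (now_dock : List Int) (out : List Int) : Decidable (Spec_calculate_sum_coyote players_card_list now_dock out) := by unfold Spec_calculate_sum_coyote; infer_instance

-- ===== CLAIM (what is proved, stated in full; the proofs are below) =====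
def Claim_equal_calculate_sum_coyote : Prop := ∀ (players_card_list : List Int) (now_dock : List Int), Dom_calculate_sum_coyote players_card_list now_dock → Spec_calculate_sum_coyote players_card_list now_dock (calculate_sum_coyote players_card_list now_dock)

-- ===== LEMMAS AND PROOFS =====

-- the value of max(nc) is the (unique) maximum
lemma pvMax_unique (nc : List Int) (m m' : Int)
    (h : PySem.List.max? nc (fun x => x) = some m)
    (hmem : m' ∈ nc) (hmax : ∀ y ∈ nc, y ≤ m') : m = m' :=
  le_antisymm (hmax m (PySem.List.max?_mem h)) (PySem.List.max?_isMax h m' hmem)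

-- every element of s.drop i is bounded by s[i] on a descending-sorted s
lemma pvDropHead (s : List Int) (hs : s.Pairwise (fun a b => b ≤ a)) (i : Nat)
    (hi : i < s.length) : ∀ y ∈ s.drop i, y ≤ s[i] := by
  have hd : s.drop i = s[i] :: s.drop (i + 1) := List.drop_eq_getElem_cons hi
  have hp : (s.drop i).Pairwise (fun a b => b ≤ a) :=
    List.Pairwise.sublist (List.drop_sublist i s) hs
  rw [hd, List.pairwise_cons] at hp
  intro y hy
  rw [hd] at hy
  rcases List.mem_cons.mp hy with h | h
  · exact le_of_eq h
  · exact hp.1 y h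

lemma pvSetSelf (l : List Int) (i : Nat) (v : Int) (hi : i < l.length) (h : l[i] = v) :
    l.set i v = l := by
  apply List.ext_getElem
  · simp
  · intro j hj hj'
    rw [List.getElem_set]
    split_ifs with he
    · subst he; exact h.symm
    · rfl

lemma pvSetSum (nc : List Int) (i : Nat) (hi : i < nc.length) :
    (nc.set i 0).sum = nc.sum - nc[i] := by
  have hset : nc.set i 0 = nc.take i ++ 0 :: nc.drop (i + 1) := List.set_eq_take_cons_drop 0 hi
  have hdecomp : nc = nc.take i ++ nc[i] :: nc.drop (i + 1) := by
    conv_lhs => rw [← List.take_append_drop i nc]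
    rw [List.drop_eq_getElem_cons hi]
  have h1 : (nc.set i 0).sum = (nc.take i).sum + (nc.drop (i + 1)).sum := by
    rw [hset, List.sum_append, List.sum_cons]
    ring
  have h2 : nc.sum = (nc.take i).sum + nc[i] + (nc.drop (i + 1)).sum := by
    conv_lhs => rw [hdecomp]
    rw [List.sum_append, List.sum_cons]
    ring
  omega

-- the heart: A's mutable-list loop and B's pointer/counter loop, step for step.
-- Invariant: A's number_cards is (as a multiset) s.drop i plus z zero cards,
-- and B's running total is its sum.
lemma pvSimInv (s : List Int) (hs : s.Pairwise (fun a b => b ≤ a)) :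
    ∀ (sp nc : List Int) (i z : Nat) (dbl shf : Bool),
    nc.Perm (s.drop i ++ List.replicate z 0) →
    ((sp.foldl pvStepA (nc, dbl, shf)).1.sum
        = (sp.foldl (pvSimStep s) (i, z, nc.sum, dbl)).2.2.1
     ∧ (sp.foldl pvStepA (nc, dbl, shf)).2.1
        = (sp.foldl (pvSimStep s) (i, z, nc.sum, dbl)).2.2.2) := by
  intro sp
  induction sp with
  | nil => intro nc i z dbl shf _; exact ⟨rfl, rfl⟩
  | cons c sp ih =>
      intro nc i z dbl shf hperm
      rw [List.foldl_cons, List.foldl_cons]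
      by_cases h2 : c = 102
      · subst h2
        have hA : pvStepA (nc, dbl, shf) 102 = (nc ++ [0], dbl, shf) := by
          unfold pvStepA; simp
        have hB : pvSimStep s (i, z, nc.sum, dbl) 102 = (i, z + 1, nc.sum, dbl) := by
          unfold pvSimStep; simp
        rw [hA, hB]
        have hperm' : (nc ++ [0]).Perm (s.drop i ++ List.replicate (z + 1) 0) := by
          rw [List.replicate_succ', ← List.append_assoc]
          exact hperm.append_right [0]
        have hsum : (nc ++ [0]).sum = nc.sum := by simp
        have := ih (nc ++ [0]) i (z + 1) dbl shf hperm'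
        rwa [hsum] at this
      · by_cases h1 : c = 101
        · subst h1
          have hB100 : ¬ ((101 : Int) = 100 ∨ (101 : Int) = 102) := by norm_num
          by_cases hnc : nc = []
          · subst hnc
            have hnil : s.drop i ++ List.replicate z 0 = [] := hperm.symm.eq_nil
            have hlen : s.length ≤ i :=
              List.drop_eq_nil_iff.mp (List.append_eq_nil_iff.mp hnil).1
            have hA : pvStepA ([], dbl, shf) 101 = ([], dbl, shf) := by
              unfold pvStepA; simp
            have hB : pvSimStep s (i, z, (List.nil (α := Int)).sum, dbl) 101
                = (i, z, (List.nil (α := Int)).sum, dbl) := by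
              unfold pvSimStep
              rw [if_neg hB100, if_pos rfl, if_neg (by simp; omega)]
            rw [hA, hB]
            exact ih [] i z dbl shf hperm
          · -- nc nonempty: A zeroes the first maximum
            obtain ⟨m, hmax⟩ : ∃ m, PySem.List.max? nc (fun x => x) = some m := by
              rcases nc with _ | ⟨x, tl⟩
              · exact absurd rfl hnc
              · exact ⟨tl.foldl max x, PySem.List.max?_id_cons ..⟩
            have hmem : m ∈ nc := PySem.List.max?_mem hmax
            obtain ⟨idx, hidx⟩ : ∃ idx, PySem.List.index? nc m = some idx := by
              rw [PySem.List.index?_eq_idxOf?]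
              rcases h : List.idxOf? m nc with _ | j
              · exact absurd (List.idxOf?_eq_none_iff.mp h) (by simpa using hmem)
              · exact ⟨j, rfl⟩
            obtain ⟨hilt, hget, -⟩ := PySem.List.getElem_of_index?_eq_some hidx
            have hA : pvStepA (nc, dbl, shf) 101 = (nc.set idx 0, dbl, true) := by
              unfold pvStepA
              rw [if_neg (by norm_num), if_pos rfl, if_pos (by simpa using hnc)]
              rw [PySem.List.index?_eq_idxOf?] at hidx
              simp [hmax, hidx]
            rw [hA]
            by_cases hcond : i < s.length ∧ (0 < s.getD i 0 ∨ z = 0)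
            · -- the zeroed maximum is s[i]
              obtain ⟨hi, hor⟩ := hcond
              have hgetD : s.getD i 0 = s[i] := List.getD_eq_getElem s 0 hi
              have hsimem : s[i] ∈ nc := by
                apply hperm.symm.subset
                apply List.mem_append_left
                rw [List.drop_eq_getElem_cons hi]
                exact List.mem_cons_self ..
              have hsimax : ∀ y ∈ nc, y ≤ s[i] := by
                intro y hy
                rcases List.mem_append.mp (hperm.subset hy) with h | h
                · exact pvDropHead s hs i hi y h
                · have hy0 : y = 0 := List.eq_of_mem_replicate h
                  rcases hor with hpos | hz0
                  · rw [hgetD] at hpos; omega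
                  · subst hz0; simp at h
              have hm : m = s[i] := pvMax_unique nc m s[i] hmax hsimem hsimax
              have hB : pvSimStep s (i, z, nc.sum, dbl) 101
                  = (i + 1, z + 1, nc.sum - s.getD i 0, dbl) := by
                unfold pvSimStep
                rw [if_neg hB100, if_pos rfl, if_pos ⟨hi, hor⟩]
              rw [hB]
              have hdecomp : nc = nc.take idx ++ m :: nc.drop (idx + 1) := by
                conv_lhs => rw [← List.take_append_drop idx nc]
                rw [List.drop_eq_getElem_cons hilt, hget]
              have hset : nc.set idx 0 = nc.take idx ++ 0 :: nc.drop (idx + 1) :=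
                List.set_eq_take_cons_drop 0 hilt
              have htail : (nc.take idx ++ nc.drop (idx + 1)).Perm
                  (s.drop (i + 1) ++ List.replicate z 0) := by
                have hh1 : nc.Perm (m :: (nc.take idx ++ nc.drop (idx + 1))) := by
                  conv_lhs => rw [hdecomp]
                  exact List.perm_middle
                have hh2 : nc.Perm (s[i] :: (s.drop (i + 1) ++ List.replicate z 0)) := by
                  have he : s.drop i ++ List.replicate z 0
                      = s[i] :: (s.drop (i + 1) ++ List.replicate z 0) := by
                    rw [List.drop_eq_getElem_cons hi]; rfl
                  rw [← he]; exact hperm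
                rw [hm] at hh1
                exact (hh1.symm.trans hh2).cons_inv
              have hperm' : (nc.set idx 0).Perm
                  (s.drop (i + 1) ++ List.replicate (z + 1) 0) := by
                rw [hset, List.replicate_succ]
                exact List.perm_middle.trans ((htail.cons 0).trans List.perm_middle.symm)
              have hsum : (nc.set idx 0).sum = nc.sum - s.getD i 0 := by
                rw [pvSetSum nc idx hilt, hget, hm, hgetD]
              have := ih (nc.set idx 0) (i + 1) (z + 1) dbl true hperm'
              rwa [hsum] at this
            · -- the maximum in play is a zero card: A's zeroing changes nothing
              have h0mem : (0 : Int) ∈ nc := by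
                have hz : z ≠ 0 := by
                  by_cases hi : i < s.length
                  · have hnor : ¬ (0 < s.getD i 0 ∨ z = 0) := fun hor => hcond ⟨hi, hor⟩
                    rw [not_or] at hnor
                    exact hnor.2
                  · intro hz0
                    subst hz0
                    have hdnil : s.drop i = [] := List.drop_eq_nil_iff.mpr (by omega)
                    apply hnc
                    have hp : nc.Perm [] := by simpa [hdnil] using hperm
                    exact hp.eq_nil
                exact hperm.symm.subset
                  (List.mem_append_right _ (List.mem_replicate.mpr ⟨hz, rfl⟩))
              have hall : ∀ y ∈ nc, y ≤ 0 := by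
                intro y hy
                rcases List.mem_append.mp (hperm.subset hy) with h | h
                · by_cases hi : i < s.length
                  · have hnor : ¬ (0 < s.getD i 0 ∨ z = 0) := fun hor => hcond ⟨hi, hor⟩
                    rw [not_or] at hnor
                    have hle := pvDropHead s hs i hi y h
                    have hle0 := hnor.1
                    rw [List.getD_eq_getElem s 0 hi] at hle0
                    omega
                  · have hdnil : s.drop i = [] := List.drop_eq_nil_iff.mpr (by omega)
                    rw [hdnil] at h
                    simp at h
                · exact le_of_eq (List.eq_of_mem_replicate h)
              have hm0 : m = 0 := pvMax_unique nc m 0 hmax h0mem hall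
              have hB : pvSimStep s (i, z, nc.sum, dbl) 101 = (i, z, nc.sum, dbl) := by
                unfold pvSimStep
                rw [if_neg hB100, if_pos rfl, if_neg hcond]
              have hsetid : nc.set idx 0 = nc := pvSetSelf nc idx 0 hilt (by rw [hget, hm0])
              rw [hB, hsetid]
              exact ih nc i z dbl true hperm
        · by_cases h0 : c = 100
          · subst h0
            have hA : pvStepA (nc, dbl, shf) 100 = (nc ++ [0], true, shf) := by
              unfold pvStepA; norm_num
            have hB : pvSimStep s (i, z, nc.sum, dbl) 100 = (i, z + 1, nc.sum, true) := by
              unfold pvSimStep; simp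
            rw [hA, hB]
            have hperm' : (nc ++ [0]).Perm (s.drop i ++ List.replicate (z + 1) 0) := by
              rw [List.replicate_succ', ← List.append_assoc]
              exact hperm.append_right [0]
            have hsum : (nc ++ [0]).sum = nc.sum := by simp
            have := ih (nc ++ [0]) i (z + 1) true shf hperm'
            rwa [hsum] at this
          · have hA : pvStepA (nc, dbl, shf) c = (nc, dbl, shf) := by
              unfold pvStepA; rw [if_neg h2, if_neg h1, if_neg h0]
            have hB : pvSimStep s (i, z, nc.sum, dbl) c = (i, z, nc.sum, dbl) := by
              unfold pvSimStep
              rw [if_neg (by tauto), if_neg h1]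
            rw [hA, hB]
            exact ih nc i z dbl shf hperm

-- A's helper equals B's simulate on the split hand
lemma pvCswrEq (p : List Int) :
    (calculate_sum_without_random p).1
      = pvSimulate (p.filter (fun c => decide (c < 100))) (p.filter (fun c => decide (c ≥ 100))) := by
  simp only [calculate_sum_without_random, pvSimulate]
  have hperm0 : (p.filter (fun c => decide (c < 100))).Perm
      ((PySem.List.sorted (p.filter (fun c => decide (c < 100))) (fun x => x) true).drop 0
        ++ List.replicate 0 0) := by
    simpa using (PySem.List.sorted_perm (p.filter (fun c => decide (c < 100))) (fun x => x) true).symm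
  have hsum0 : (PySem.List.sorted (p.filter (fun c => decide (c < 100))) (fun x => x) true).sum
      = (p.filter (fun c => decide (c < 100))).sum :=
    (PySem.List.sorted_perm (p.filter (fun c => decide (c < 100))) (fun x => x) true).sum_eq
  obtain ⟨h1, h2⟩ := pvSimInv _
    (PySem.List.sorted_pairwise_rev (p.filter (fun c => decide (c < 100))) (fun x => x))
    (p.filter (fun c => decide (c ≥ 100))) (p.filter (fun c => decide (c < 100)))
    0 0 false false hperm0
  rw [hsum0, h1, h2]
  split_ifs with hb
  · ring
  · rfl

lemma pvMainEq (p nd : List Int) : calculate_sum_coyote p nd = calculate_sum_coyote_alt p nd := by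
  simp only [calculate_sum_coyote, calculate_sum_coyote_alt]
  by_cases h103 : (p.filter (fun c => decide (c ≥ 100))).contains 103 = true
  · rw [if_pos h103, if_neg (not_not_intro h103)]
    rw [PySem.List.foldl_append_singleton_eq_map, List.nil_append]
    apply List.map_congr_left
    intro card _
    rw [pvCswrEq (p ++ [card]), List.filter_append, List.filter_append]
    by_cases hc : card < 100
    · rw [if_pos hc]
      have hf1 : [card].filter (fun c => decide (c < 100)) = [card] := by simp [hc]
      have hf2 : [card].filter (fun c => decide (c ≥ 100)) = [] := by simp; omega
      rw [hf1, hf2, List.append_nil]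
    · rw [if_neg hc]
      have hf1 : [card].filter (fun c => decide (c < 100)) = [] := by simp; omega
      have hf2 : [card].filter (fun c => decide (c ≥ 100)) = [card] := by simp; omega
      rw [hf1, hf2, List.append_nil]
  · rw [if_neg h103, if_pos h103]
    rw [pvCswrEq p]

-- ===== VERDICT (by name: the statement is the Claim_ definition above) =====
theorem calculate_sum_coyote_spec : Claim_equal_calculate_sum_coyote := by
  intro players_card_list now_dock _hdom
  exact pvMainEq players_card_list now_dock
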